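-- pv_equiv track=rewrite | github.com/m-sirius-k/MoCKA | archive/_untracked_stash_20260226_170942/tools/phase14_reselect_tip.py | compute_lengths
-- ===== SOURCE A (Python) =====
-- def compute_lengths(edges):
--     prev = {e:p for e,p in edges}
--     lengths = {}
--
--     def length(e):
--         if e in lengths:
--             return lengths[e]
--         p = prev.get(e)
--         if not p:
--             lengths[e] = 1
--         else:
--             lengths[e] = 1 + length(p)
--         return lengths[e]
--
--     for e,_ in edges:
--         length(e)
--
--     return lengths
-- ===== SOURCE B (Python) =====
-- def compute_lengths(edges):
--     # Iterative: explicit stack walk instead of recursion; same memo dict.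
--     prev = {e: p for e, p in edges}
--     lengths = {}
--     for e, _ in edges:
--         if e in lengths:
--             continue
--         stack = []
--         cur = e
--         base = 0
--         while cur not in lengths:
--             p = prev.get(cur)
--             stack.append(cur)
--             if not p:
--                 break
--             cur = p
--         else:
--             base = lengths[cur]
--         for node in reversed(stack):
--             base += 1
--             lengths[node] = base
--     return lengths
-- ===== Notes on version B (the rewrite author's own statement) =====
-- stated objective: alternative
-- what changed: Replaces A's memoized recursive helper with an explicit iterative stack walk: follow prev pointers pushing uncached nodes, then assign lengths while popping in reverse, reproducing the same memo dict and insertion order without recursion.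
import Mathlib
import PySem

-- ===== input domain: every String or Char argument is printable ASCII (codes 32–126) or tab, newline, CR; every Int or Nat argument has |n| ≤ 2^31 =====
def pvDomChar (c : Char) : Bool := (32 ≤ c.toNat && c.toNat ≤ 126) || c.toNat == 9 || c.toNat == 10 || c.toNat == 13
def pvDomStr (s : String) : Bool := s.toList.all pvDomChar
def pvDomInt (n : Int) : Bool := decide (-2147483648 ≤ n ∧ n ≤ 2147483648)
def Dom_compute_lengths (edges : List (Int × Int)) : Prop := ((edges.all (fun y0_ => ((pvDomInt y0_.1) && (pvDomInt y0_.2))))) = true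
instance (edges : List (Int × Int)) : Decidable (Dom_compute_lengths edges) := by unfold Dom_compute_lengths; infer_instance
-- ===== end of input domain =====

-- B replaces A's memoized recursion by an explicit stack walk (same memo dict, same
-- insertion order); objective: alternative decomposition, same cost.

-- ===== PORT A =====
-- the recursive helper `length`; fuel bounds the recursion depth (under Pre_ the
-- chain is acyclic, so fuel edges.length+1 is never exhausted on admitted inputs)
def pvLenA (prev : PySem.Dict Int Int) : Nat → Int → PySem.Dict Int Int → Int × PySem.Dict Int Int
  | 0, _, L => (0, L)
  | f+1, e, L =>
    match L.get? e with
    | some v => (v, L)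
    | none =>
      match prev.get? e with
      | none => (1, L.insert e 1)
      | some p =>
        if p = 0 then (1, L.insert e 1)   -- "not p": 0 is falsy, terminal
        else
          let r := pvLenA prev f p L
          (1 + r.1, r.2.insert e (1 + r.1))

def compute_lengths (edges : List (Int × Int)) : List (Int × Int) :=
  (edges.foldl (fun L e => (pvLenA (PySem.Dict.ofList edges) (edges.length + 1) e.1 L).2)
    PySem.Dict.empty).items

-- ===== PORT B =====
-- the while-loop walk: collect the uncached chain into a stack, return it with the base length
def pvWalkB (prev L : PySem.Dict Int Int) : Nat → Int → List Int × Int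
  | 0, _ => ([], 0)
  | f+1, cur =>
    match L.get? cur with
    | some v => ([], v)
    | none =>
      match prev.get? cur with
      | none => ([cur], 0)
      | some p =>
        if p = 0 then ([cur], 0)
        else
          let r := pvWalkB prev L f p
          (cur :: r.1, r.2)

-- the `for node in reversed(stack)` assignment loop (argument is stack.reverse)
def pvAssign : List Int → Int → PySem.Dict Int Int → PySem.Dict Int Int
  | [], _, L => L
  | n :: t, b, L => pvAssign t (b + 1) (L.insert n (b + 1))

def compute_lengths_alt (edges : List (Int × Int)) : List (Int × Int) :=
  (edges.foldl (fun L e =>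
      if L.contains e.1 then L
      else
        pvAssign (pvWalkB (PySem.Dict.ofList edges) L (edges.length + 1) e.1).1.reverse
          (pvWalkB (PySem.Dict.ofList edges) L (edges.length + 1) e.1).2 L)
    PySem.Dict.empty).items

-- ===== PRECONDITION & SPEC =====
def pvStep (prev : PySem.Dict Int Int) (k : Int) : Option Int :=
  match prev.get? k with
  | none => none
  | some p => if p = 0 then none else some p

def pvIter (prev : PySem.Dict Int Int) : Nat → Int → Option Int
  | 0, k => some k
  | n+1, k =>
    match pvStep prev k with
    | none => none
    | some p => pvIter prev n p

-- Pre_ excludes exactly the inputs whose prev-chain is cyclic: there Python A raises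
-- RecursionError (and Python B loops), so no value is claimed.
def Pre_compute_lengths (edges : List (Int × Int)) : Prop :=
  ∀ k ∈ (PySem.Dict.ofList edges).keys,
    ∀ m ∈ List.range (PySem.Dict.ofList edges).keys.length,
      pvIter (PySem.Dict.ofList edges) (m + 1) k ≠ some k

instance (edges : List (Int × Int)) : Decidable (Pre_compute_lengths edges) := by
  unfold Pre_compute_lengths; infer_instance

def pvWitness_compute_lengths : (List (Int × Int)) := [(2, 1), (1, 0), (3, 2)]

def Spec_compute_lengths (edges : List (Int × Int)) (out : List (Int × Int)) : Prop := out = compute_lengths_alt edges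
instance (edges : List (Int × Int)) (out : List (Int × Int)) : Decidable (Spec_compute_lengths edges out) := by unfold Spec_compute_lengths; infer_instance

-- ===== CLAIM (what is proved, stated in full; the proofs are below) =====
def Claim_equal_compute_lengths : Prop := ∀ (edges : List (Int × Int)), Dom_compute_lengths edges → Pre_compute_lengths edges → Spec_compute_lengths edges (compute_lengths edges)

-- ===== LEMMAS AND PROOFS =====

lemma pvAssign_append (xs : List Int) (e : Int) (b : Int) (L : PySem.Dict Int Int) :
    pvAssign (xs ++ [e]) b L = (pvAssign xs b L).insert e (b + xs.length + 1) := by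
  induction xs generalizing b L with
  | nil => simp [pvAssign]
  | cons x t ih =>
    simp only [List.cons_append, pvAssign, ih, List.length_cons]
    congr 1
    push_cast
    ring

-- core correspondence: the stack walk + reversed assignment of B is the recursion of A,
-- at every fuel, both for the resulting dict and for the computed length
lemma pvWalk_eq_lenA (prev : PySem.Dict Int Int) (f : Nat) (e : Int) (L : PySem.Dict Int Int) :
    pvAssign (pvWalkB prev L f e).1.reverse (pvWalkB prev L f e).2 L = (pvLenA prev f e L).2 ∧
    (pvWalkB prev L f e).2 + ((pvWalkB prev L f e).1.length : Int) = (pvLenA prev f e L).1 := by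
  induction f generalizing e with
  | zero => simp [pvWalkB, pvLenA, pvAssign]
  | succ f ih =>
    simp only [pvWalkB, pvLenA]
    cases h : L.get? e with
    | some v => simp [pvAssign]
    | none =>
      cases hp : prev.get? e with
      | none => simp [pvAssign]
      | some p =>
        by_cases h0 : p = 0
        · simp [h0, pvAssign]
        · obtain ⟨ih1, ih2⟩ := ih p
          simp only [h0, if_false, List.reverse_cons, pvAssign_append, List.length_reverse,
            List.length_cons, ih1]
          constructor
          · congr 1
            omega
          · omega

lemma pv_fold_eq (prev : PySem.Dict Int Int) (F : Nat) (es : List (Int × Int)) (L : PySem.Dict Int Int) :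
    es.foldl (fun L e => (pvLenA prev (F + 1) e.1 L).2) L =
    es.foldl (fun L e =>
      if L.contains e.1 then L
      else pvAssign (pvWalkB prev L (F + 1) e.1).1.reverse (pvWalkB prev L (F + 1) e.1).2 L) L := by
  induction es generalizing L with
  | nil => rfl
  | cons e t ih =>
    simp only [List.foldl_cons]
    have hstep : (pvLenA prev (F + 1) e.1 L).2 =
        (if L.contains e.1 then L
         else pvAssign (pvWalkB prev L (F + 1) e.1).1.reverse (pvWalkB prev L (F + 1) e.1).2 L) := by
      cases hg : L.get? e.1 with
      | some v =>
        have hc : L.contains e.1 = true := by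
          rw [PySem.Dict.contains_eq_isSome_get?, hg]; rfl
        simp [pvLenA, hg, hc]
      | none =>
        have hc : L.contains e.1 = false := by
          rw [PySem.Dict.contains_eq_isSome_get?, hg]; rfl
        rw [if_neg (by simp [hc])]
        exact ((pvWalk_eq_lenA prev (F + 1) e.1 L).1).symm
    rw [hstep, ih]

-- ===== VERDICT (by name: the statement is the Claim_ definition above) =====
theorem compute_lengths_spec : Claim_equal_compute_lengths := by
  intro edges _ _
  unfold Spec_compute_lengths compute_lengths compute_lengths_alt
  rw [pv_fold_eq]
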